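-- pv_equiv track=rewrite | github.com/Prophecy-Jimpsons/Telegram-Games | src/games/logic/game_logic.py | find_winning_pattern
-- ===== SOURCE A (Python) =====
-- from typing import List, Optional, Tuple
--
-- def find_winning_pattern(board: List[List[str]]) -> Optional[List[Tuple[int, int]]]:
--     """
--     Find a winning pattern on the board.
--     Returns the list of winning positions or None if no winner.
--     """
--     # Check rows and columns
--     for i in range(4):
--         if all(board[i][j] == "X" for j in range(4)):
--             return [(i, j) for j in range(4)]
--         if all(board[i][j] == "O" for j in range(4)):
--             return [(i, j) for j in range(4)]
--         if all(board[j][i] == "X" for j in range(4)):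
--             return [(j, i) for j in range(4)]
--         if all(board[j][i] == "O" for j in range(4)):
--             return [(j, i) for j in range(4)]
--
--     # Check diagonals
--     if all(board[i][i] == "X" for i in range(4)):
--         return [(i, i) for i in range(4)]
--     if all(board[i][i] == "O" for i in range(4)):
--         return [(i, i) for i in range(4)]
--     if all(board[i][3-i] == "X" for i in range(4)):
--         return [(i, 3-i) for i in range(4)]
--     if all(board[i][3-i] == "O" for i in range(4)):
--         return [(i, 3-i) for i in range(4)]
--
--     # Check 2x2 squares
--     for i in range(3):
--         for j in range(3):
--             if all(board[i+di][j+dj] == "X" for di, dj in [(0,0), (0,1), (1,0), (1,1)]):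
--                 return [(i+di, j+dj) for di, dj in [(0,0), (0,1), (1,0), (1,1)]]
--             if all(board[i+di][j+dj] == "O" for di, dj in [(0,0), (0,1), (1,0), (1,1)]):
--                 return [(i+di, j+dj) for di, dj in [(0,0), (0,1), (1,0), (1,1)]]
--
--     return None
-- ===== SOURCE B (Python) =====
-- # Bitboard rewrite: encode the board once as two 16-bit masks (X and O),
-- # precompute a bitmask for every winning pattern, then test each pattern
-- # with a single AND per player instead of probing board cells.
--
-- def _patterns():
--     pats = []
--     for i in range(4):
--         pats.append([(i, j) for j in range(4)])
--         pats.append([(j, i) for j in range(4)])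
--     pats.append([(i, i) for i in range(4)])
--     pats.append([(i, 3 - i) for i in range(4)])
--     for i in range(3):
--         for j in range(3):
--             pats.append([(i + di, j + dj) for di, dj in ((0, 0), (0, 1), (1, 0), (1, 1))])
--     return pats
--
-- def _mask(pat):
--     m = 0
--     for i, j in pat:
--         m |= 1 << (4 * i + j)
--     return m
--
-- _MASKED_PATTERNS = [(_mask(p), p) for p in _patterns()]
--
-- def find_winning_pattern(board):
--     xm = om = 0
--     for k in range(16):
--         v = board[k // 4][k % 4]
--         if v == "X":
--             xm |= 1 << k
--         elif v == "O":
--             om |= 1 << k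
--     for m, pat in _MASKED_PATTERNS:
--         if xm & m == m:
--             return list(pat)
--         if om & m == m:
--             return list(pat)
--     return None
-- ===== Notes on version B (the rewrite author's own statement) =====
-- stated objective: alternative
-- what changed: Replaces A's per-pattern cell probing by a bitboard algorithm: one pass encodes the board into two 16-bit masks (X and O) and each winning pattern becomes a precomputed bitmask tested with a single AND, instead of A's four hand-written blocks of per-cell comparisons.
import Mathlib
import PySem

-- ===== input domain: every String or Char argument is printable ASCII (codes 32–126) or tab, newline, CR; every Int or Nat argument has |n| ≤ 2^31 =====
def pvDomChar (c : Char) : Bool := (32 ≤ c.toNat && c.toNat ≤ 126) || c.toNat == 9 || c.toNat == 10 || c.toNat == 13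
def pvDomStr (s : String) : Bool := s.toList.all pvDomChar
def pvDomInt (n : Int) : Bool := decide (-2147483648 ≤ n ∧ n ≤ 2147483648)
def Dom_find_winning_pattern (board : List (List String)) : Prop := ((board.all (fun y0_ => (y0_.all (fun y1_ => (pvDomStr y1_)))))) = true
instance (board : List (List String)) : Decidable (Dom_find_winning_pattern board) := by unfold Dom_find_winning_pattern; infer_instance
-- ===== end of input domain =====

-- B replaces A's four hand-written per-cell check blocks by a bitboard algorithm: one pass encodes
-- the board into two 16-bit masks and each pattern is tested with a single AND against a precomputed
-- pattern bitmask (objective: alternative); equivalence is proved on boards with at least a 4x4 prefix.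


-- ===== PORT A =====
-- board[i][j] == s  (out-of-range cell gives false; Pre_ keeps all accessed cells in range)
def pvCellIs (board : List (List String)) (i j : Int) (s : String) : Bool :=
  ((PySem.List.pyGet? board i).bind (fun r => PySem.List.pyGet? r j)) == some s

def pvSquareOffs : List (Int × Int) := [(0, 0), (0, 1), (1, 0), (1, 1)]

-- 'for i in range(4)': rows-and-columns loop, four checks per i, in A's order
def pvALoop1 (board : List (List String)) : List Int → Option (List (Int × Int))
  | [] => none
  | i :: rest =>
    if (PySem.List.pyRange 0 4 1).all (fun j => pvCellIs board i j "X") then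
      some ((PySem.List.pyRange 0 4 1).map (fun j => (i, j)))
    else if (PySem.List.pyRange 0 4 1).all (fun j => pvCellIs board i j "O") then
      some ((PySem.List.pyRange 0 4 1).map (fun j => (i, j)))
    else if (PySem.List.pyRange 0 4 1).all (fun j => pvCellIs board j i "X") then
      some ((PySem.List.pyRange 0 4 1).map (fun j => (j, i)))
    else if (PySem.List.pyRange 0 4 1).all (fun j => pvCellIs board j i "O") then
      some ((PySem.List.pyRange 0 4 1).map (fun j => (j, i)))
    else pvALoop1 board rest

-- 'for i in range(3): for j in range(3)': the 2x2-square checks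
def pvALoop2 (board : List (List String)) : List (Int × Int) → Option (List (Int × Int))
  | [] => none
  | (i, j) :: rest =>
    if pvSquareOffs.all (fun d => pvCellIs board (i + d.1) (j + d.2) "X") then
      some (pvSquareOffs.map (fun d => (i + d.1, j + d.2)))
    else if pvSquareOffs.all (fun d => pvCellIs board (i + d.1) (j + d.2) "O") then
      some (pvSquareOffs.map (fun d => (i + d.1, j + d.2)))
    else pvALoop2 board rest

def find_winning_pattern (board : List (List String)) : Option (List (Int × Int)) :=
  match pvALoop1 board (PySem.List.pyRange 0 4 1) with
  | some p => some p
  | none =>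
    if (PySem.List.pyRange 0 4 1).all (fun i => pvCellIs board i i "X") then
      some ((PySem.List.pyRange 0 4 1).map (fun i => (i, i)))
    else if (PySem.List.pyRange 0 4 1).all (fun i => pvCellIs board i i "O") then
      some ((PySem.List.pyRange 0 4 1).map (fun i => (i, i)))
    else if (PySem.List.pyRange 0 4 1).all (fun i => pvCellIs board i (3 - i) "X") then
      some ((PySem.List.pyRange 0 4 1).map (fun i => (i, 3 - i)))
    else if (PySem.List.pyRange 0 4 1).all (fun i => pvCellIs board i (3 - i) "O") then
      some ((PySem.List.pyRange 0 4 1).map (fun i => (i, 3 - i)))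
    else
      pvALoop2 board
        ((PySem.List.pyRange 0 3 1).flatMap (fun i => (PySem.List.pyRange 0 3 1).map (fun j => (i, j))))

-- ===== PORT B =====
-- Source B: bitboards.  board[a][b]  (none = IndexError, excluded by Pre_)
def pvBCell? (board : List (List String)) (i j : Int) : Option String :=
  (PySem.List.pyGet? board i).bind (fun r => PySem.List.pyGet? r j)

-- _patterns(): the coordinate lists, in Source B's build order
def pvBPatterns : List (List (Int × Int)) :=
  ((PySem.List.pyRange 0 4 1).flatMap (fun i =>
      [(PySem.List.pyRange 0 4 1).map (fun j => (i, j)),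
       (PySem.List.pyRange 0 4 1).map (fun j => (j, i))]))
  ++ [(PySem.List.pyRange 0 4 1).map (fun i => (i, i)),
      (PySem.List.pyRange 0 4 1).map (fun i => (i, 3 - i))]
  ++ ((PySem.List.pyRange 0 3 1).flatMap (fun i =>
        (PySem.List.pyRange 0 3 1).map (fun j =>
          pvSquareOffs.map (fun d => (i + d.1, j + d.2)))))

-- _mask(pat): OR together the bit of each coordinate
def pvBMaskOf (pat : List (Int × Int)) : Nat :=
  pat.foldl (fun m c => m ||| (1 <<< (4 * c.1 + c.2).toNat)) 0

-- _MASKED_PATTERNS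
def pvBMaskedPatterns : List (Nat × List (Int × Int)) :=
  pvBPatterns.map (fun p => (pvBMaskOf p, p))

-- loop body of 'for k in range(16)': v = board[k//4][k%4]; if v=="X": xm|=1<<k elif v=="O": om|=1<<k
-- (a missing cell — IndexError in Python, excluded by Pre_ — marks neither mask)
def pvBStep (board : List (List String)) (s : Nat × Nat) (k : Int) : Nat × Nat :=
  if pvBCell? board (PySem.Int.floordiv k 4) (PySem.Int.mod k 4) == some "X" then
    (s.1 ||| (1 <<< k.toNat), s.2)
  else if pvBCell? board (PySem.Int.floordiv k 4) (PySem.Int.mod k 4) == some "O" then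
    (s.1, s.2 ||| (1 <<< k.toNat))
  else s

def pvBMasks (board : List (List String)) : Nat × Nat :=
  (PySem.List.pyRange 0 16 1).foldl (pvBStep board) (0, 0)

-- 'for m, pat in _MASKED_PATTERNS': one AND per player per pattern
def pvBScan2 (xm om : Nat) : List (Nat × List (Int × Int)) → Option (List (Int × Int))
  | [] => none
  | (m, pat) :: rest =>
    if xm &&& m == m then some pat
    else if om &&& m == m then some pat
    else pvBScan2 xm om rest

def find_winning_pattern_alt (board : List (List String)) : Option (List (Int × Int)) :=
  let s := pvBMasks board
  pvBScan2 s.1 s.2 pvBMaskedPatterns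

-- ===== PRECONDITION & SPEC =====
-- Pre_ is the game's natural domain, boards with at least a 4x4 prefix; on smaller boards A
-- generally raises IndexError, though a win found before the first missing cell still returns
-- early.
def Pre_find_winning_pattern (board : List (List String)) : Prop :=
  4 ≤ board.length ∧ ∀ r ∈ board.take 4, 4 ≤ r.length
instance (board : List (List String)) : Decidable (Pre_find_winning_pattern board) := by
  unfold Pre_find_winning_pattern; infer_instance

def pvWitness_find_winning_pattern : List (List String) :=
  [["X", "O", "X", "O"], ["O", "X", "O", "X"], ["X", "O", "X", "O"], ["O", "X", "O", "X"]]

def Spec_find_winning_pattern (board : List (List String)) (out : Option (List (Int × Int))) : Prop := out = find_winning_pattern_alt board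
instance (board : List (List String)) (out : Option (List (Int × Int))) : Decidable (Spec_find_winning_pattern board out) := by unfold Spec_find_winning_pattern; infer_instance

-- ===== CLAIM (what is proved, stated in full; the proofs are below) =====
def Claim_equal_find_winning_pattern : Prop := ∀ (board : List (List String)), Dom_find_winning_pattern board → Pre_find_winning_pattern board → Spec_find_winning_pattern board (find_winning_pattern board)

-- ===== LEMMAS AND PROOFS =====
-- proof-only intermediate: the plain pattern-table scan (cell comparisons, A's check order)
def pvTblScan (board : List (List String)) : List (List (Int × Int)) → Option (List (Int × Int))
  | [] => none
  | pat :: rest =>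
    if pat.all (fun c => pvCellIs board c.1 c.2 "X") then some pat
    else if pat.all (fun c => pvCellIs board c.1 c.2 "O") then some pat
    else pvTblScan board rest

theorem pv_scan_append (b : List (List String)) (l1 l2 : List (List (Int × Int))) :
    pvTblScan b (l1 ++ l2) =
      (match pvTblScan b l1 with
       | some p => some p
       | none => pvTblScan b l2) := by
  induction l1 with
  | nil => rfl
  | cons p t ih =>
    simp only [List.cons_append, pvTblScan]
    split_ifs <;> simp [ih]

theorem pv_rowcol (b : List (List String)) (is : List Int) :
    pvTblScan b (is.flatMap (fun i =>
      [(PySem.List.pyRange 0 4 1).map (fun j => (i, j)),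
       (PySem.List.pyRange 0 4 1).map (fun j => (j, i))])) = pvALoop1 b is := by
  induction is with
  | nil => rfl
  | cons i rest ih =>
    simp only [List.flatMap_cons, List.cons_append, List.nil_append, pvTblScan, pvALoop1,
      List.all_map, Function.comp_def]
    split_ifs <;> simp [ih]

theorem pv_squares (b : List (List String)) (ps : List (Int × Int)) :
    pvTblScan b (ps.map (fun p => pvSquareOffs.map (fun d => (p.1 + d.1, p.2 + d.2)))) =
      pvALoop2 b ps := by
  induction ps with
  | nil => rfl
  | cons p t ih =>
    simp only [List.map_cons, pvTblScan, pvALoop2, List.all_map, Function.comp_def]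
    split_ifs <;> simp [ih]

theorem pv_squares_list :
    ((PySem.List.pyRange 0 3 1).flatMap (fun i =>
        (PySem.List.pyRange 0 3 1).map (fun j =>
          pvSquareOffs.map (fun d => (i + d.1, j + d.2))))) =
      (((PySem.List.pyRange 0 3 1).flatMap (fun i =>
          (PySem.List.pyRange 0 3 1).map (fun j => (i, j)))).map
        (fun p => pvSquareOffs.map (fun d => (p.1 + d.1, p.2 + d.2)))) := by decide

-- A equals the plain table scan
theorem pv_A_eq_tbl (b : List (List String)) :
    find_winning_pattern b = pvTblScan b pvBPatterns := by
  unfold find_winning_pattern pvBPatterns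
  rw [List.append_assoc, pv_scan_append, pv_rowcol]
  cases pvALoop1 b (PySem.List.pyRange 0 4 1) with
  | some p => rfl
  | none =>
    rw [pv_scan_append, pv_squares_list, pv_squares]
    simp only [pvTblScan, List.all_map, Function.comp_def]
    split_ifs <;> rfl

-- x &&& m = m ↔ every bit of m is a bit of x
theorem pv_and_sup (x m : Nat) :
    x &&& m = m ↔ ∀ b, m.testBit b = true → x.testBit b = true := by
  constructor
  · intro h b hb
    have := congrArg (fun n => n.testBit b) h
    simp only [Nat.testBit_and, hb, Bool.and_true] at this
    exact this
  · intro h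
    apply Nat.eq_of_testBit_eq
    intro b
    rw [Nat.testBit_and]
    by_cases hb : m.testBit b = true
    · simp [hb, h b hb]
    · simp [Bool.eq_false_iff.mpr hb]

-- bits of a pattern mask
theorem pv_maskOf_testBit (pat : List (Int × Int)) : ∀ (acc : Nat) (b : Nat),
    (pat.foldl (fun m c => m ||| (1 <<< (4 * c.1 + c.2).toNat)) acc).testBit b =
      (acc.testBit b || pat.any (fun c => (4 * c.1 + c.2).toNat == b)) := by
  induction pat with
  | nil => intro acc b; simp
  | cons c t ih =>
    intro acc b
    rw [List.foldl_cons, ih]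
    simp only [List.any_cons, Nat.testBit_or, Nat.shiftLeft_eq, one_mul, Nat.testBit_two_pow]
    cases acc.testBit b <;> cases h : ((4 * c.1 + c.2).toNat == b) <;>
      simp_all [Bool.or_comm, Bool.or_left_comm]

-- bits of the two board masks (accumulator-generalised over the remaining loop indices)
theorem pv_masks_fold_testBit (board : List (List String)) (ks : List Int) :
    ∀ (s : Nat × Nat) (b : Nat),
      ((ks.foldl (pvBStep board) s).1.testBit b =
        (s.1.testBit b || ks.any (fun k => (k.toNat == b) &&
          (pvBCell? board (PySem.Int.floordiv k 4) (PySem.Int.mod k 4) == some "X")))) ∧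
      ((ks.foldl (pvBStep board) s).2.testBit b =
        (s.2.testBit b || ks.any (fun k => (k.toNat == b) &&
          (pvBCell? board (PySem.Int.floordiv k 4) (PySem.Int.mod k 4) == some "O")))) := by
  induction ks with
  | nil => intro s b; simp
  | cons k t ih =>
    intro s b
    simp only [List.foldl_cons, List.any_cons]
    cases hX : (pvBCell? board (PySem.Int.floordiv k 4) (PySem.Int.mod k 4) == some "X") with
    | true =>
      have hO : (pvBCell? board (PySem.Int.floordiv k 4) (PySem.Int.mod k 4) == some "O") = false := by
        simp only [beq_iff_eq] at hX ⊢; rw [hX]; simp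
      have e1 : pvBStep board s k = (s.1 ||| (1 <<< k.toNat), s.2) := by
        simp only [pvBStep, hX, hO]; rfl
      rw [e1]
      simp only [hX, hO, Bool.and_true, Bool.and_false, Bool.false_or]
      constructor
      · rw [(ih _ b).1]
        simp only [Nat.testBit_or, Nat.shiftLeft_eq, one_mul, Nat.testBit_two_pow]
        cases s.1.testBit b <;> cases h : (k.toNat == b) <;>
          simp_all [Bool.or_comm, Bool.or_left_comm]
      · rw [(ih _ b).2]
    | false =>
      cases hO : (pvBCell? board (PySem.Int.floordiv k 4) (PySem.Int.mod k 4) == some "O") with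
      | true =>
        have e2 : pvBStep board s k = (s.1, s.2 ||| (1 <<< k.toNat)) := by
          simp only [pvBStep, hX, hO]; rfl
        rw [e2]
        simp only [hX, hO, Bool.and_true, Bool.and_false, Bool.false_or]
        constructor
        · rw [(ih _ b).1]
        · rw [(ih _ b).2]
          simp only [Nat.testBit_or, Nat.shiftLeft_eq, one_mul, Nat.testBit_two_pow]
          cases s.2.testBit b <;> cases h : (k.toNat == b) <;>
            simp_all [Bool.or_comm, Bool.or_left_comm]
      | false =>
        have e3 : pvBStep board s k = s := by
          simp only [pvBStep, hX, hO]; rfl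
        rw [e3]
        simp only [hX, hO, Bool.and_false, Bool.false_or]
        exact ih s b

theorem pv_range16 : PySem.List.pyRange 0 16 1 =
    [0, 1, 2, 3, 4, 5, 6, 7, 8, 9, 10, 11, 12, 13, 14, 15] := by decide

-- collapse 'some index of range(16) hits bit b' to the single index b
theorem pv_any16 (f : Int → Bool) (b : Nat) (hb : b < 16) :
    (([0, 1, 2, 3, 4, 5, 6, 7, 8, 9, 10, 11, 12, 13, 14, 15] : List Int).any
        (fun k => (k.toNat == b) && f k)) = f (b : Int) := by
  interval_cases b <;> simp [List.any]

-- cell bit of the board masks, for an in-range coordinate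
theorem pv_masks_bit (board : List (List String)) (i j : Int)
    (hi0 : 0 ≤ i) (hi : i < 4) (hj0 : 0 ≤ j) (hj : j < 4) :
    ((pvBMasks board).1.testBit (4 * i + j).toNat = (pvBCell? board i j == some "X")) ∧
    ((pvBMasks board).2.testBit (4 * i + j).toNat = (pvBCell? board i j == some "O")) := by
  have h := pv_masks_fold_testBit board (PySem.List.pyRange 0 16 1) (0, 0) (4 * i + j).toNat
  rw [pv_range16] at h
  have hb : (4 * i + j).toNat < 16 := by omega
  have h1 := h.1
  have h2 := h.2
  rw [pv_any16 _ _ hb] at h1 h2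
  have hcast : (((4 * i + j).toNat : Nat) : Int) = 4 * i + j := by omega
  have hfd : PySem.Int.floordiv (4 * i + j) 4 = i := by
    rw [PySem.Int.floordiv_eq_iff_of_pos (by norm_num)]; omega
  have hmd : PySem.Int.mod (4 * i + j) 4 = j := by
    have hdm := PySem.Int.floordiv_mul_add_mod (4 * i + j) 4
    rw [hfd] at hdm; omega
  rw [hcast, hfd, hmd] at h1 h2
  unfold pvBMasks
  rw [pv_range16]
  simp only [h1, h2]
  simp

-- bridge: mask inclusion = all pattern cells carry the mark
theorem pv_bridge (board : List (List String)) (pat : List (Int × Int))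
    (h : ∀ c ∈ pat, 0 ≤ c.1 ∧ c.1 < 4 ∧ 0 ≤ c.2 ∧ c.2 < 4) (s : String) (hs : s = "X" ∨ s = "O") :
    (((if s = "X" then (pvBMasks board).1 else (pvBMasks board).2) &&& pvBMaskOf pat = pvBMaskOf pat)
      ↔ (pat.all (fun c => pvCellIs board c.1 c.2 s) = true)) := by
  have key : ∀ (xm : Nat),
      (∀ i j, 0 ≤ i → i < 4 → 0 ≤ j → j < 4 →
        xm.testBit (4 * i + j).toNat = (pvBCell? board i j == some s)) →
      ((xm &&& pvBMaskOf pat = pvBMaskOf pat)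
        ↔ (pat.all (fun c => pvCellIs board c.1 c.2 s) = true)) := by
    intro xm hx
    rw [pv_and_sup]
    constructor
    · intro hb
      rw [List.all_eq_true]
      intro c hc
      obtain ⟨b1, b2, b3, b4⟩ := h c hc
      have hm : (pvBMaskOf pat).testBit (4 * c.1 + c.2).toNat = true := by
        unfold pvBMaskOf
        rw [pv_maskOf_testBit]
        simp only [Nat.zero_testBit, Bool.false_or, List.any_eq_true]
        exact ⟨c, hc, by simp⟩
      have hcell := hb _ hm
      rw [hx c.1 c.2 b1 b2 b3 b4] at hcell
      exact hcell
    · intro hall b hb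
      unfold pvBMaskOf at hb
      rw [pv_maskOf_testBit] at hb
      simp only [Nat.zero_testBit, Bool.false_or, List.any_eq_true, beq_iff_eq] at hb
      obtain ⟨c, hc, hcb⟩ := hb
      obtain ⟨b1, b2, b3, b4⟩ := h c hc
      rw [← hcb, hx c.1 c.2 b1 b2 b3 b4]
      rw [List.all_eq_true] at hall
      exact hall c hc
  rcases hs with rfl | rfl
  · rw [if_pos rfl]
    exact key _ (fun i j h1 h2 h3 h4 => (pv_masks_bit board i j h1 h2 h3 h4).1)
  · rw [if_neg (by decide : ¬("O" : String) = "X")]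
    exact key _ (fun i j h1 h2 h3 h4 => (pv_masks_bit board i j h1 h2 h3 h4).2)

theorem pv_bounds : ∀ pat ∈ pvBPatterns, ∀ c ∈ pat,
    0 ≤ c.1 ∧ c.1 < 4 ∧ 0 ≤ c.2 ∧ c.2 < 4 := by decide

-- the bitmask scan equals the plain table scan
theorem pv_scan2_eq_tbl (board : List (List String)) (L : List (List (Int × Int)))
    (hL : ∀ pat ∈ L, ∀ c ∈ pat, 0 ≤ c.1 ∧ c.1 < 4 ∧ 0 ≤ c.2 ∧ c.2 < 4) :
    pvBScan2 (pvBMasks board).1 (pvBMasks board).2 (L.map (fun p => (pvBMaskOf p, p))) =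
      pvTblScan board L := by
  induction L with
  | nil => rfl
  | cons pat t ih =>
    have hpat := hL pat (List.mem_cons_self ..)
    have ht : ∀ p ∈ t, ∀ c ∈ p, 0 ≤ c.1 ∧ c.1 < 4 ∧ 0 ≤ c.2 ∧ c.2 < 4 :=
      fun p hp => hL p (List.mem_cons_of_mem _ hp)
    have hX := pv_bridge board pat hpat "X" (Or.inl rfl)
    have hO := pv_bridge board pat hpat "O" (Or.inr rfl)
    rw [if_pos rfl] at hX
    rw [if_neg (by decide : ¬("O" : String) = "X")] at hO
    simp only [List.map_cons, pvBScan2, pvTblScan, beq_iff_eq]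
    rw [if_congr hX rfl rfl, if_congr hO rfl rfl]
    split_ifs <;> simp [ih ht]

theorem pv_ports_eq (b : List (List String)) :
    find_winning_pattern b = find_winning_pattern_alt b := by
  rw [pv_A_eq_tbl]
  unfold find_winning_pattern_alt pvBMaskedPatterns
  rw [pv_scan2_eq_tbl b pvBPatterns pv_bounds]

-- ===== VERDICT (by name: the statement is the Claim_ definition above) =====
theorem find_winning_pattern_spec : Claim_equal_find_winning_pattern := by
  intro board _ _
  exact pv_ports_eq board
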